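-- pv_equiv track=rewrite | github.com/vinzemeke/Finviz_scraper | src/services/options_data_service.py | _merge_oi_data_from_map
-- ===== SOURCE A (Python) =====
-- from typing import Dict, Any, Optional, List
--
-- def _merge_oi_data_from_map(options_data: List[Dict], polygon_oi_map: Dict, option_type: str) -> List[Dict]:
--     """
--     Merge Polygon.io OI data with existing options data using the map format.
--     Matches by strike price and option type.
--     """
--     for option in options_data:
--         strike = option.get('strike')
--         if strike is not None:
--             # Look for matching OI data by strike price and option type
--             map_key = (option_type, strike)
--             if map_key in polygon_oi_map:
--                 option['openInterest'] = polygon_oi_map[map_key]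
--                 option['oi_source'] = 'polygon'  # Mark the source
--
--     return options_data
-- ===== SOURCE B (Python) =====
-- def _merge_oi_data_from_map(options_data, polygon_oi_map, option_type):
--     """Index options by strike once, then walk the OI map and update every
--     matching option in place; returns the same list object."""
--     index = {}
--     for option in options_data:
--         strike = option.get('strike')
--         if strike is not None:
--             index.setdefault(strike, []).append(option)
--     for (otype, strike), oi in polygon_oi_map.items():
--         if otype == option_type and strike in index:
--             for option in index[strike]:
--                 option['openInterest'] = oi
--                 option['oi_source'] = 'polygon'
--     return options_data
-- ===== Notes on version B (the rewrite author's own statement) =====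
-- stated objective: alternative
-- what changed: B replaces A's per-option scan-and-lookup loop by a two-phase decomposition: it first builds a strike->options index in one pass over options_data, then drives the update from polygon_oi_map's items, updating every indexed option per matching map entry.
import Mathlib
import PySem

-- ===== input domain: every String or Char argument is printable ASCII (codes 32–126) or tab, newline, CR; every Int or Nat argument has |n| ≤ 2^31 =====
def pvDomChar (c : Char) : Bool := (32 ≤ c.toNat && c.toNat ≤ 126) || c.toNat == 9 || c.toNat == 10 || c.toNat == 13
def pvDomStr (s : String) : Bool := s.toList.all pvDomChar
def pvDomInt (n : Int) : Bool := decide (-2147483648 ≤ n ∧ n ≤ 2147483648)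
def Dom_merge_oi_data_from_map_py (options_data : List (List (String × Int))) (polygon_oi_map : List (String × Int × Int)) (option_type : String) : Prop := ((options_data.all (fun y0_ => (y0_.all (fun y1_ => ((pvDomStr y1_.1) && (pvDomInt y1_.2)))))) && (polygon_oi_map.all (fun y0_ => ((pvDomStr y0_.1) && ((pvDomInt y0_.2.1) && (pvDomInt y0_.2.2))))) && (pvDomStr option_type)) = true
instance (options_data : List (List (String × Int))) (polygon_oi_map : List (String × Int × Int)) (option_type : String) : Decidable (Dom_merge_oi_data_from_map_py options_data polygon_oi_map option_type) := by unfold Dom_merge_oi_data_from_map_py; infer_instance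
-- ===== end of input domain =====

-- B rebuilds the merge as two phases (index options by strike once, then walk the OI map); same cost,
-- different decomposition. Both Pythons mutate the option dicts in place; the equivalence is about the
-- returned value (B performs the same mutation). The string 'polygon' both Pythons store under
-- 'oi_source' lies outside the Int value type of the ported dicts; BOTH ports model it by the Int 0,
-- stored at exactly the place their Python stores 'polygon'; the ports are exact otherwise.

-- ===== PORT A =====
-- dict lookup: first match in the association list
def pyDictGet? {κ ν : Type} [BEq κ] (d : List (κ × ν)) (k : κ) : Option ν :=
  (d.find? (fun p => p.1 == k)).map (·.2)

-- dict assignment d[k] = v: overwrite in place if the key exists, else append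
def pyDictSet {κ ν : Type} [BEq κ] (d : List (κ × ν)) (k : κ) (v : ν) : List (κ × ν) :=
  if d.any (fun p => p.1 == k) then d.map (fun p => if p.1 == k then (p.1, v) else p)
  else d ++ [(k, v)]

def merge_oi_data_from_map_py (options_data : List (List (String × Int))) (polygon_oi_map : List (String × Int × Int)) (option_type : String) : List (List (String × Int)) :=
  options_data.map (fun option =>
    match pyDictGet? option "strike" with
    | none => option
    | some strike =>
      match polygon_oi_map.find? (fun e => e.1 == option_type && e.2.1 == strike) with
      | some e => pyDictSet (pyDictSet option "openInterest" e.2.2) "oi_source" 0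
      | none => option)

-- ===== PORT B =====
-- index.setdefault(s, []).append(i)
def pvAddIdx (idx : List (Int × List Int)) (s : Int) (i : Int) : List (Int × List Int) :=
  if idx.any (fun p => p.1 == s) then idx.map (fun p => if p.1 == s then (p.1, p.2 ++ [i]) else p)
  else idx ++ [(s, [i])]

-- phase 1: strike -> list of option positions (positions stand for Python's object references)
def pvIndexB (options_data : List (List (String × Int))) : List (Int × List Int) :=
  (PySem.List.enumerate options_data 0).foldl (fun idx p =>
    match pyDictGet? p.2 "strike" with
    | some s => pvAddIdx idx s p.1
    | none => idx) []

-- phase 2: walk the OI map, recording position -> openInterest value (the in-place updates)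
def pvUpdB (index : List (Int × List Int)) (polygon_oi_map : List (String × Int × Int)) (option_type : String) : List (Int × Int) :=
  polygon_oi_map.foldl (fun u e =>
    if e.1 == option_type then
      match pyDictGet? index e.2.1 with
      | some is => is.foldl (fun u i => pyDictSet u i e.2.2) u
      | none => u
    else u) []

def merge_oi_data_from_map_py_alt (options_data : List (List (String × Int))) (polygon_oi_map : List (String × Int × Int)) (option_type : String) : List (List (String × Int)) :=
  let upd := pvUpdB (pvIndexB options_data) polygon_oi_map option_type
  (PySem.List.enumerate options_data 0).map (fun p =>
    match pyDictGet? upd p.1 with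
    | some v => pyDictSet (pyDictSet p.2 "openInterest" v) "oi_source" 0
    | none => p.2)

-- ===== PRECONDITION & SPEC =====
-- Pre_ excludes association lists encoding polygon_oi_map with two entries for the same (type, strike)
-- key: a Python dict cannot hold duplicate keys, so such lists encode no Python input, and on them
-- first-match (A's port) versus last-write (B's port) order is accidental.
def Pre_merge_oi_data_from_map_py (options_data : List (List (String × Int))) (polygon_oi_map : List (String × Int × Int)) (option_type : String) : Prop :=
  (polygon_oi_map.map (fun e => (e.1, e.2.1))).Nodup
instance (options_data : List (List (String × Int))) (polygon_oi_map : List (String × Int × Int)) (option_type : String) : Decidable (Pre_merge_oi_data_from_map_py options_data polygon_oi_map option_type) := by unfold Pre_merge_oi_data_from_map_py; infer_instance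

def pvWitness_merge_oi_data_from_map_py : (List (List (String × Int))) × (List (String × Int × Int)) × String :=
  ([[("strike", 1), ("x", 7)], [("strike", 1)], [("y", 2)]], [("c", (1, 5)), ("p", (1, 9))], "c")

def Spec_merge_oi_data_from_map_py (options_data : List (List (String × Int))) (polygon_oi_map : List (String × Int × Int)) (option_type : String) (out : List (List (String × Int))) : Prop := out = merge_oi_data_from_map_py_alt options_data polygon_oi_map option_type
instance (options_data : List (List (String × Int))) (polygon_oi_map : List (String × Int × Int)) (option_type : String) (out : List (List (String × Int))) : Decidable (Spec_merge_oi_data_from_map_py options_data polygon_oi_map option_type out) := by unfold Spec_merge_oi_data_from_map_py; infer_instance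

-- ===== CLAIM (what is proved, stated in full; the proofs are below) =====
def Claim_equal_merge_oi_data_from_map_py : Prop := ∀ (options_data : List (List (String × Int))) (polygon_oi_map : List (String × Int × Int)) (option_type : String), Dom_merge_oi_data_from_map_py options_data polygon_oi_map option_type → Pre_merge_oi_data_from_map_py options_data polygon_oi_map option_type → Spec_merge_oi_data_from_map_py options_data polygon_oi_map option_type (merge_oi_data_from_map_py options_data polygon_oi_map option_type)

-- ===== LEMMAS AND PROOFS =====

def lookL (d : List (Int × List Int)) (s : Int) : List Int :=
  (pyDictGet? d s).getD []

def idxFun (ps : List (Int × List (String × Int))) (s : Int) : List Int :=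
  match ps with
  | [] => []
  | p :: ps => (if pyDictGet? p.2 "strike" = some s then [p.1] else []) ++ idxFun ps s

theorem get?_pyDictSet {κ ν : Type} [DecidableEq κ] [BEq κ] [LawfulBEq κ] (d : List (κ × ν)) (k k' : κ) (v : ν) :
    pyDictGet? (pyDictSet d k v) k' = if k' = k then some v else pyDictGet? d k' := by
  unfold pyDictSet pyDictGet?
  by_cases hin : d.any (fun p => p.1 == k) = true
  · simp only [hin, if_true, List.find?_map]
    have hkey : ((fun p : κ × ν => p.1 == k') ∘ (fun p => if p.1 == k then (p.1, v) else p))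
        = (fun p : κ × ν => p.1 == k') := by
      funext p; by_cases h : p.1 = k <;> simp [h]
    rw [hkey]
    cases hf : d.find? (fun p => p.1 == k') with
    | none =>
      have : ¬ k' = k := by
        intro hk; subst hk
        rw [List.any_eq_true] at hin
        obtain ⟨p, hp, hpk⟩ := hin
        rw [List.find?_eq_none] at hf
        exact hf p hp hpk
      simp [this]
    | some q =>
      have hqk : q.1 = k' := by simpa using List.find?_some hf
      by_cases hk : k' = k
      · subst hk; simp [hqk]
      · simp [hqk, hk]
  · simp only [hin, if_false, List.find?_append]
    have hf : d.find? (fun p => p.1 == k) = none := by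
      rw [List.find?_eq_none]; intro p hp hpk
      exact hin (List.any_eq_true.mpr ⟨p, hp, hpk⟩)
    by_cases hk : k' = k
    · subst hk; simp [hf, List.find?]
    · cases hf' : d.find? (fun p => p.1 == k') with
      | none =>
        have : (k == k') = false := by simp [Ne.symm hk]
        simp [hf', List.find?, this, hk]
      | some q =>
        have : (k == k') = false := by simp [Ne.symm hk]
        simp [hf', List.find?, this, hk]

theorem lookL_pvAddIdx (idx : List (Int × List Int)) (s0 j s : Int) :
    lookL (pvAddIdx idx s0 j) s = lookL idx s ++ (if s = s0 then [j] else []) := by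
  unfold pvAddIdx lookL pyDictGet?
  by_cases hin : idx.any (fun p => p.1 == s0) = true
  · simp only [hin, if_true, List.find?_map]
    have hkey : ((fun p : Int × List Int => p.1 == s) ∘ (fun p => if p.1 == s0 then (p.1, p.2 ++ [j]) else p))
        = (fun p : Int × List Int => p.1 == s) := by
      funext p; by_cases h : p.1 = s0 <;> simp [h]
    rw [hkey]
    cases hf : idx.find? (fun p => p.1 == s) with
    | none =>
      have : ¬ s = s0 := by
        intro hk; subst hk
        rw [List.any_eq_true] at hin
        obtain ⟨p, hp, hpk⟩ := hin
        rw [List.find?_eq_none] at hf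
        exact hf p hp hpk
      simp [this]
    | some q =>
      have hqk : q.1 = s := by simpa using List.find?_some hf
      by_cases hk : s = s0
      · subst hk; simp [hqk]
      · simp [hqk, hk]
  · simp only [hin, List.find?_append]
    have hf : idx.find? (fun p => p.1 == s0) = none := by
      rw [List.find?_eq_none]; intro p hp hpk
      exact hin (List.any_eq_true.mpr ⟨p, hp, hpk⟩)
    by_cases hk : s = s0
    · subst hk; simp [hf, List.find?]
    · cases hf' : idx.find? (fun p => p.1 == s) with
      | none =>
        have : (s0 == s) = false := by simp [Ne.symm hk]
        simp [hf', List.find?, this, hk]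
      | some q =>
        have : (s0 == s) = false := by simp [Ne.symm hk]
        simp [hf', List.find?, this, hk]

theorem lookL_foldIdx (ps : List (Int × List (String × Int))) (acc : List (Int × List Int)) (s : Int) :
    lookL (ps.foldl (fun idx p =>
      match pyDictGet? p.2 "strike" with
      | some s => pvAddIdx idx s p.1
      | none => idx) acc) s = lookL acc s ++ idxFun ps s := by
  induction ps generalizing acc with
  | nil => simp [idxFun]
  | cons p ps ih =>
    simp only [List.foldl_cons, idxFun]
    cases hg : pyDictGet? p.2 "strike" with
    | none => simp [hg, ih]
    | some s0 =>
      rw [ih]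
      rw [lookL_pvAddIdx]
      by_cases hk : s = s0
      · subst hk; simp [List.append_assoc]
      · have h2 : ¬ pyDictGet? p.2 "strike" = some s := by
          rw [hg]; simp; exact fun h => hk h.symm
        simp [hk]; exact fun h => hk h.symm

theorem lookL_pvIndexB (od : List (List (String × Int))) (s : Int) :
    lookL (pvIndexB od) s = idxFun (PySem.List.enumerate od 0) s := by
  unfold pvIndexB
  rw [lookL_foldIdx]
  simp [lookL, pyDictGet?]

theorem mem_idxFun (ps : List (Int × List (String × Int))) (s i : Int) :
    i ∈ idxFun ps s ↔ ∃ q ∈ ps, q.1 = i ∧ pyDictGet? q.2 "strike" = some s := by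
  induction ps with
  | nil => simp [idxFun]
  | cons p ps ih =>
    simp only [idxFun, List.mem_append, ih, List.mem_cons]
    constructor
    · rintro (h | ⟨q, hq, h1, h2⟩)
      · by_cases hg : pyDictGet? p.2 "strike" = some s
        · simp [hg] at h; exact ⟨p, Or.inl rfl, h.symm, hg⟩
        · simp [hg] at h
      · exact ⟨q, Or.inr hq, h1, h2⟩
    · rintro ⟨q, (rfl | hq), h1, h2⟩
      · left; simp [h2, h1]
      · right; exact ⟨q, hq, h1, h2⟩

theorem get?_foldSet (l : List Int) (u : List (Int × Int)) (v i : Int) :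
    pyDictGet? (l.foldl (fun u j => pyDictSet u j v) u) i
      = if i ∈ l then some v else pyDictGet? u i := by
  induction l generalizing u with
  | nil => simp
  | cons j l ih =>
    simp only [List.foldl_cons, ih, List.mem_cons]
    by_cases hl : i ∈ l
    · simp [hl]
    · by_cases hj : i = j <;> simp [hl, hj, get?_pyDictSet]

theorem get?_updStep (idx : List (Int × List Int)) (u : List (Int × Int)) (e : String × Int × Int) (t : String) (i : Int) :
    pyDictGet? (if e.1 == t then
      match pyDictGet? idx e.2.1 with
      | some is => is.foldl (fun u i => pyDictSet u i e.2.2) u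
      | none => u
    else u) i = if e.1 = t ∧ i ∈ lookL idx e.2.1 then some e.2.2 else pyDictGet? u i := by
  by_cases ht : e.1 = t
  · have hmatch : (match pyDictGet? idx e.2.1 with
      | some is => is.foldl (fun u i => pyDictSet u i e.2.2) u
      | none => u) = (lookL idx e.2.1).foldl (fun u i => pyDictSet u i e.2.2) u := by
      unfold lookL
      cases pyDictGet? idx e.2.1 <;> simp
    simp only [ht, beq_self_eq_true, if_true, hmatch, get?_foldSet]
    by_cases hm : i ∈ lookL idx e.2.1 <;> simp [hm]
  · have : (e.1 == t) = false := by simp [ht]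
    simp [this, ht]

theorem get?_pvUpdB (idx : List (Int × List Int)) (m : List (String × Int × Int)) (t : String) (i : Int) :
    pyDictGet? (pvUpdB idx m t) i
      = m.foldl (fun r e => if e.1 = t ∧ i ∈ lookL idx e.2.1 then some e.2.2 else r) none := by
  unfold pvUpdB
  have key : ∀ (ms : List (String × Int × Int)) (u : List (Int × Int)),
      pyDictGet? (ms.foldl (fun u e =>
        if e.1 == t then
          match pyDictGet? idx e.2.1 with
          | some is => is.foldl (fun u i => pyDictSet u i e.2.2) u
          | none => u
        else u) u) i
      = ms.foldl (fun r e => if e.1 = t ∧ i ∈ lookL idx e.2.1 then some e.2.2 else r) (pyDictGet? u i) := by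
    intro ms
    induction ms with
    | nil => intro u; rfl
    | cons e ms ih =>
      intro u
      simp only [List.foldl_cons, ih, get?_updStep]
  rw [key]
  simp [pyDictGet?]

theorem enumerate_fst_inj (od : List (List (String × Int))) (p q : Int × List (String × Int))
    (hp : p ∈ PySem.List.enumerate od 0) (hq : q ∈ PySem.List.enumerate od 0)
    (h : p.1 = q.1) : p = q := by
  rw [PySem.List.mem_enumerate_iff] at hp hq
  obtain ⟨k, hk, rfl⟩ := hp
  obtain ⟨k', hk', rfl⟩ := hq
  simp only [zero_add] at h ⊢
  have : k = k' := by exact_mod_cast h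
  subst this; rfl

theorem mem_lookL_pvIndexB (od : List (List (String × Int))) (p : Int × List (String × Int))
    (hp : p ∈ PySem.List.enumerate od 0) (s : Int) :
    p.1 ∈ lookL (pvIndexB od) s ↔ pyDictGet? p.2 "strike" = some s := by
  rw [lookL_pvIndexB, mem_idxFun]
  constructor
  · rintro ⟨q, hq, h1, h2⟩
    have := enumerate_fst_inj od q p hq hp h1
    subst this; exact h2
  · intro h; exact ⟨p, hp, rfl, h⟩

theorem foldl_if_none {α : Type} (ms : List α) (C : α → Prop) [DecidablePred C]
    (f : α → Option Int) (r : Option Int)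
    (h : ∀ e ∈ ms, ¬ C e) :
    ms.foldl (fun r e => if C e then f e else r) r = r := by
  induction ms generalizing r with
  | nil => rfl
  | cons e ms ih =>
    simp only [List.foldl_cons, if_neg (h e (List.mem_cons_self ..))]
    exact ih r (fun x hx => h x (List.mem_cons_of_mem _ hx))

theorem foldl_lastMatch_eq_find (m : List (String × Int × Int)) (t : String) (s : Int)
    (hnd : (m.map (fun e => (e.1, e.2.1))).Nodup) :
    m.foldl (fun r e => if e.1 = t ∧ s = e.2.1 then some e.2.2 else r) none
      = (m.find? (fun e => e.1 == t && e.2.1 == s)).map (·.2.2) := by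
  induction m with
  | nil => rfl
  | cons e ms ih =>
    simp only [List.map_cons, List.nodup_cons] at hnd
    obtain ⟨hkey, hnd'⟩ := hnd
    by_cases hc : e.1 = t ∧ s = e.2.1
    · have hpred : (e.1 == t && e.2.1 == s) = true := by simp [hc.1, hc.2.symm]
      simp only [List.foldl_cons, List.find?_cons, hpred, if_pos hc]
      rw [foldl_if_none]
      · simp
      · rintro e' he' ⟨h1, h2⟩
        exact hkey (by
          rw [List.mem_map]
          exact ⟨e', he', by simp [h1, ← h2, hc.1, hc.2]⟩)
    · have hpred : (e.1 == t && e.2.1 == s) = false := by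
        by_cases h1 : e.1 = t
        · have h2 : ¬ s = e.2.1 := fun h => hc ⟨h1, h⟩
          simp [h1]; exact fun hh => h2 hh.symm
        · simp [h1]
      simp only [List.foldl_cons, List.find?_cons, hpred, if_neg hc]
      exact ih hnd'

theorem get?_upd_char (od : List (List (String × Int))) (m : List (String × Int × Int)) (t : String)
    (hnd : (m.map (fun e => (e.1, e.2.1))).Nodup)
    (p : Int × List (String × Int)) (hp : p ∈ PySem.List.enumerate od 0) :
    pyDictGet? (pvUpdB (pvIndexB od) m t) p.1
      = (match pyDictGet? p.2 "strike" with
         | none => none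
         | some s => (m.find? (fun e => e.1 == t && e.2.1 == s)).map (·.2.2)) := by
  rw [get?_pvUpdB]
  cases hg : pyDictGet? p.2 "strike" with
  | none =>
    have hnone : List.foldl (fun (r : Option Int) (e : String × Int × Int) =>
        if e.1 = t ∧ p.1 ∈ lookL (pvIndexB od) e.2.1 then some e.2.2 else r) none m = none := by
      refine foldl_if_none m _ (fun e => some e.2.2) none ?_
      rintro e _ ⟨_, hmem⟩
      rw [mem_lookL_pvIndexB od p hp] at hmem
      simp [hg] at hmem
    simpa using hnone
  | some s =>
    have hfun : (fun (r : Option Int) (e : String × Int × Int) =>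
        if e.1 = t ∧ p.1 ∈ lookL (pvIndexB od) e.2.1 then some e.2.2 else r)
      = (fun (r : Option Int) (e : String × Int × Int) =>
        if e.1 = t ∧ s = e.2.1 then some e.2.2 else r) := by
      funext r e
      have hiff : (e.1 = t ∧ p.1 ∈ lookL (pvIndexB od) e.2.1) ↔ (e.1 = t ∧ s = e.2.1) := by
        rw [mem_lookL_pvIndexB od p hp, hg]
        simp [eq_comm]
      rw [if_congr hiff rfl rfl]
    rw [hfun, foldl_lastMatch_eq_find m t s hnd]

theorem ports_eq (od : List (List (String × Int))) (m : List (String × Int × Int)) (t : String)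
    (hnd : (m.map (fun e => (e.1, e.2.1))).Nodup) :
    merge_oi_data_from_map_py od m t = merge_oi_data_from_map_py_alt od m t := by
  unfold merge_oi_data_from_map_py merge_oi_data_from_map_py_alt
  have hbody : ∀ p ∈ PySem.List.enumerate od 0,
      (match pyDictGet? (pvUpdB (pvIndexB od) m t) p.1 with
        | some v => pyDictSet (pyDictSet p.2 "openInterest" v) "oi_source" 0
        | none => p.2)
      = (match pyDictGet? p.2 "strike" with
          | none => p.2
          | some strike =>
            match m.find? (fun e => e.1 == t && e.2.1 == strike) with
            | some e => pyDictSet (pyDictSet p.2 "openInterest" e.2.2) "oi_source" 0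
            | none => p.2) := by
    intro p hp
    rw [get?_upd_char od m t hnd p hp]
    cases hg : pyDictGet? p.2 "strike" with
    | none => simp
    | some s =>
      cases hf : m.find? (fun e => e.1 == t && e.2.1 == s) <;> simp [hf]
  rw [List.map_congr_left hbody]
  have : ((PySem.List.enumerate od 0).map (fun p =>
      (match pyDictGet? p.2 "strike" with
        | none => p.2
        | some strike =>
          match m.find? (fun (e : String × Int × Int) => e.1 == t && e.2.1 == strike) with
          | some e => pyDictSet (pyDictSet p.2 "openInterest" e.2.2) "oi_source" 0
          | none => p.2)))
      = ((PySem.List.enumerate od 0).map Prod.snd).map (fun option =>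
        (match pyDictGet? option "strike" with
          | none => option
          | some strike =>
            match m.find? (fun (e : String × Int × Int) => e.1 == t && e.2.1 == strike) with
            | some e => pyDictSet (pyDictSet option "openInterest" e.2.2) "oi_source" 0
            | none => option)) := by
    rw [List.map_map]; rfl
  rw [this, PySem.List.map_snd_enumerate]

-- ===== VERDICT (by name: the statement is the Claim_ definition above) =====
theorem merge_oi_data_from_map_py_spec : Claim_equal_merge_oi_data_from_map_py := by
  intro od m t _ hpre
  unfold Pre_merge_oi_data_from_map_py at hpre
  unfold Spec_merge_oi_data_from_map_py
  exact ports_eq od m t hpre
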